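-- pv_equiv track=rewrite | github.com/josunyong/algorithm-study | 그리디/백준1946번(신입사원).py | passed
-- ===== SOURCE A (Python) =====
-- def passed(list):
--     max_score=list[0][1] # 첫번째를 일단 가장 높은 등수로 잡고
--     count=1 # 그 첫번째는 반드시 합격이라두고
--
--     # 처음에 11501번 처럼 뒤에서 접근했다가 틀림
--     for i in range(1,len(list)): # 다시 앞에서부터 접근
--
--         # 첫번째 튜플의 면접등수보다 낮다면
--         if list[i][1]<max_score:
--             # 합격생+1
--             count+=1
--             # 변수명은 score지만 등수니까 올라갈수록 점점 더 작아지는 구조 -> 등수 갱신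
--             max_score=list[i][1]
--
--
--     # 서류는 오름차순, 면접은 내림차순
--     return count
-- ===== SOURCE B (Python) =====
-- def passed(list):
--     # count applicants whose interview rank beats every earlier applicant's
--     return sum(1 for i, x in enumerate(list) if all(y[1] > x[1] for y in list[:i]))
-- ===== Notes on version B (the rewrite author's own statement) =====
-- stated objective: alternative
-- what changed: Replaces the threaded running-minimum accumulator and branching loop by a declarative count: an applicant passes iff every earlier interview rank is strictly larger, expressed as a sum over enumerate with an inner all() over the prefix.
import Mathlib
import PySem

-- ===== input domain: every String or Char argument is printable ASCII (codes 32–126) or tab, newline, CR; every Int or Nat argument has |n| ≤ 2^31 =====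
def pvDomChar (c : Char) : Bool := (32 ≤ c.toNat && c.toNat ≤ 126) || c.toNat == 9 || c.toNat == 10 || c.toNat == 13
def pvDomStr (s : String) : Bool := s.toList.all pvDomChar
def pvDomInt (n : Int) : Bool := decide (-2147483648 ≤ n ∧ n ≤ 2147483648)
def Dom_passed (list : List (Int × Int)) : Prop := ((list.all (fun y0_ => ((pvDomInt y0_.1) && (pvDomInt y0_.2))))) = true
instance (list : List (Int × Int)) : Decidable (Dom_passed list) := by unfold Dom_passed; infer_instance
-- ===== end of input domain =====

-- B replaces the threaded running-minimum accumulator by a declarative count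
-- (an applicant passes iff every earlier interview rank is strictly larger); alternative, not faster.

-- ===== PORT A =====
def passed (list : List (Int × Int)) : Int :=
  match PySem.List.pyGet? list 0 with
  | none => 0  -- unreachable under Pre_passed: Python raises IndexError here
  | some first =>
    -- max_score = list[0][1]; count = 1; for i in range(1, len(list)): …
    ((PySem.List.pyRange 1 (PySem.List.len list) 1).foldl
      (fun (st : Int × Int) i =>
        if (PySem.List.pyGetD list i (0, 0)).2 < st.1 then
          ((PySem.List.pyGetD list i (0, 0)).2, st.2 + 1)
        else st)
      (first.2, 1)).2

-- ===== PORT B =====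
def passed_alt (list : List (Int × Int)) : Int :=
  -- sum(1 for i, x in enumerate(list) if all(y[1] > x[1] for y in list[:i]))
  (PySem.List.enumerate list 0).foldl
    (fun acc ix =>
      if (PySem.List.slice list none (some ix.1)).all (fun y => decide (ix.2.2 < y.2)) then
        acc + 1
      else acc)
    0

-- ===== PRECONDITION & SPEC =====
-- Pre_ excludes exactly the empty list, on which A raises IndexError (list[0]).
def Pre_passed (list : List (Int × Int)) : Prop := list ≠ []
instance (list : List (Int × Int)) : Decidable (Pre_passed list) := by unfold Pre_passed; infer_instance
def pvWitness_passed : (List (Int × Int)) := [(1, 4), (2, 1), (3, 3)]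

def Spec_passed (list : List (Int × Int)) (out : Int) : Prop := out = passed_alt list
instance (list : List (Int × Int)) (out : Int) : Decidable (Spec_passed list out) := by unfold Spec_passed; infer_instance

-- ===== CLAIM (what is proved, stated in full; the proofs are below) =====
def Claim_equal_passed : Prop := ∀ (list : List (Int × Int)), Dom_passed list → Pre_passed list → Spec_passed list (passed list)

-- ===== LEMMAS AND PROOFS =====

/-- Reference count: number of strict new minima of the rank stream, given current minimum `m`. -/
def bcGo (m : Int) : List Int → Int
  | [] => 0
  | x :: xs => (if x < m then 1 else 0) + bcGo (min m x) xs

theorem bcGo_append (rs : List Int) (m v : Int) :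
    bcGo m (rs ++ [v]) = bcGo m rs + (if v < rs.foldl min m then 1 else 0) := by
  induction rs generalizing m with
  | nil => simp [bcGo]
  | cons r rs ih =>
    simp only [List.cons_append, bcGo, List.foldl_cons, ih (min m r)]
    split_ifs <;> omega

theorem all_lt_iff (rs : List Int) (m v : Int) :
    (∀ r ∈ m :: rs, v < r) ↔ v < rs.foldl min m := by
  induction rs generalizing m with
  | nil => simp
  | cons r rs ih =>
    rw [List.foldl_cons, ← ih (min m r)]
    constructor
    · intro h q hq
      rcases List.mem_cons.1 hq with rfl | hq
      · exact lt_min_iff.2 ⟨h m (by simp), h r (by simp)⟩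
      · exact h q (by simp [hq])
    · intro h q hq
      have hmin := h (min m r) (by simp)
      rcases List.mem_cons.1 hq with rfl | hq
      · exact (lt_min_iff.1 hmin).1
      rcases List.mem_cons.1 hq with rfl | hq
      · exact (lt_min_iff.1 hmin).2
      · exact h q (by simp [hq])

theorem passedA_foldl (t : List (Int × Int)) (m : Int) (c : Int) :
    (t.foldl (fun (st : Int × Int) q =>
        if q.2 < st.1 then (q.2, st.2 + 1) else st) (m, c)).2
      = c + bcGo m (t.map Prod.snd) := by
  induction t generalizing m c with
  | nil => simp [bcGo]
  | cons q t ih =>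
    simp only [List.foldl_cons, List.map_cons, bcGo]
    by_cases h : q.2 < m
    · simp [h, ih, min_eq_right (le_of_lt h)]; omega
    · simp [h, ih, min_eq_left (le_of_not_gt h)]

theorem passed_alt_cons (x0 : Int × Int) (t : List (Int × Int)) :
    passed_alt (x0 :: t) = 1 + bcGo x0.2 (t.map Prod.snd) := by
  induction t using List.reverseRecOn with
  | nil =>
    simp [passed_alt, PySem.List.enumerate, bcGo, PySem.List.slice]
  | append_singleton t' y ih =>
    have henum : PySem.List.enumerate ((x0 :: t') ++ [y]) 0
        = PySem.List.enumerate (x0 :: t') 0 ++ [(((x0 :: t').length : Int), y)] := by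
      rw [PySem.List.enumerate_append]
      simp [PySem.List.enumerate]
    unfold passed_alt
    rw [show x0 :: (t' ++ [y]) = (x0 :: t') ++ [y] from rfl, henum, List.foldl_append]
    -- the fold over the old prefix agrees with passed_alt (x0 :: t')
    have hpref : ∀ (acc : Int), ∀ ix ∈ PySem.List.enumerate (x0 :: t') 0,
        (fun (acc : Int) (ix : Int × (Int × Int)) =>
          if (PySem.List.slice ((x0 :: t') ++ [y]) none (some ix.1)).all
              (fun q => decide (ix.2.2 < q.2)) then acc + 1 else acc) acc ix
        = (fun (acc : Int) (ix : Int × (Int × Int)) =>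
          if (PySem.List.slice (x0 :: t') none (some ix.1)).all
              (fun q => decide (ix.2.2 < q.2)) then acc + 1 else acc) acc ix := by
      intro acc ix hix
      rcases (PySem.List.mem_enumerate_iff _ _ _).1 hix with ⟨k, hk, rfl⟩
      simp only [zero_add]
      rw [PySem.List.slice_to_natCast, PySem.List.slice_to_natCast,
        List.take_append_of_le_length (le_of_lt hk)]
    rw [PySem.List.foldl_congr_mem _ _ _ _ hpref]
    have hbase : (PySem.List.enumerate (x0 :: t') 0).foldl
        (fun (acc : Int) (ix : Int × (Int × Int)) =>
          if (PySem.List.slice (x0 :: t') none (some ix.1)).all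
              (fun q => decide (ix.2.2 < q.2)) then acc + 1 else acc) 0
        = passed_alt (x0 :: t') := rfl
    rw [hbase, ih]
    -- the final element: compare y's rank with every earlier rank
    have hslice : PySem.List.slice ((x0 :: t') ++ [y]) none (some ((x0 :: t').length : Int))
        = x0 :: t' := by
      rw [PySem.List.slice_to_natCast]
      simp
    simp only [List.foldl_cons, List.foldl_nil, hslice]
    have hall : (((x0 :: t').all fun q => decide (y.2 < q.2)) = true)
        ↔ y.2 < (t'.map Prod.snd).foldl min x0.2 := by
      rw [← all_lt_iff (t'.map Prod.snd) x0.2 y.2]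
      simp [List.all_eq_true]
      exact fun _ => ⟨fun h1 a x hx => h1 x a hx, fun h2 a b hb => h2 b a hb⟩
    rw [show (t' ++ [y]).map Prod.snd = t'.map Prod.snd ++ [y.2] by simp, bcGo_append]
    by_cases h : y.2 < (t'.map Prod.snd).foldl min x0.2
    · rw [if_pos (hall.2 h), if_pos h]; ring
    · rw [if_neg (fun hc => h (hall.1 hc)), if_neg h]; ring

-- ===== VERDICT (by name: the statement is the Claim_ definition above) =====
theorem passed_spec : Claim_equal_passed := by
  intro list _hdom hpre
  unfold Spec_passed
  match list, hpre with
  | x0 :: t, _ =>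
    unfold passed
    have hget : PySem.List.pyGet? (x0 :: t) 0 = some x0 := by
      simp [PySem.List.pyGet?, PySem.List.pyIdx?]
    rw [hget]
    simp only
    rw [show PySem.List.len (x0 :: t) = ((x0 :: t).length : Int) by simp]
    rw [PySem.List.foldl_pyRange_pyGetD' (x0 :: t) ((0 : Int), (0 : Int))
      (fun (st : Int × Int) q => if q.2 < st.1 then (q.2, st.2 + 1) else st) (x0.2, 1)
      (by norm_num : (0 : Int) ≤ 1)]
    simp only [Int.toNat_one, List.drop_succ_cons, List.drop_zero]
    rw [passedA_foldl, passed_alt_cons]
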